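-- pv_equiv track=rewrite | github.com/firedrakeproject/firedrake | python/fluidity/diagnostics/annulus_mesh.py | GenerateAnnulusVerticalIntegralBins
-- ===== SOURCE A (Python) =====
-- def GenerateAnnulusVerticalIntegralBins(nRCoords, nZCoords, nPhiCoords,
--                                         connectEnds=True):
--     """For a 3D annulus mesh generated with GenerateAnnulusMesh, and a 2D
--     horizontal annulus slice mesh generated with
--     GenerateAnnulusHorizontalSliceMesh (with the same options), return a list
--     of vertical cell bins."""
--
--     if connectEnds:
--         phiDivisions = nPhiCoords
--     else:
--         phiDivisions = nPhiCoords - 1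
--
--     vBins = [[] for i in range((nRCoords - 1) * phiDivisions)]
--     integratedIndex = 0
--     for i in range(nRCoords - 1):
--         for j in range(nZCoords - 1):
--             targetIndex = i * phiDivisions
--             for k in range(phiDivisions):
--                 for l in range(6):
--                     vBins[targetIndex].append(integratedIndex)
--                     integratedIndex += 1
--                 targetIndex += 1
--
--     return vBins
-- ===== SOURCE B (Python) =====
-- def GenerateAnnulusVerticalIntegralBins(nRCoords, nZCoords, nPhiCoords,
--                                         connectEnds=True):
--     """Build each vertical bin directly by closed-form index arithmetic."""
--     if connectEnds:
--         phiDivisions = nPhiCoords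
--     else:
--         phiDivisions = nPhiCoords - 1
--     nz = nZCoords - 1
--     return [[((i * nz + j) * phiDivisions + k) * 6 + l
--              for j in range(nz) for l in range(6)]
--             for i in range(nRCoords - 1) for k in range(phiDivisions)]
-- ===== Notes on version B (the rewrite author's own statement) =====
-- stated objective: simpler
-- what changed: Replaces A's four nested single-element-append loops with their running integratedIndex counter and moving targetIndex pointer by one comprehension that builds each bin directly from the closed-form index formula ((i*(nZCoords-1)+j)*phiDivisions+k)*6+l.
-- intended difference: On degenerate inputs with nRCoords-1 < 0 and phiDivisions < 0, A returns (nRCoords-1)*phiDivisions > 0 spurious empty bins (negative times negative) that its loops never touch, while B returns [], the intended result since such a mesh has no cells and no bins. — e.g. on GenerateAnnulusVerticalIntegralBins(0, 0, -1, true): A returns [[]], B returns []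
import Mathlib
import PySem

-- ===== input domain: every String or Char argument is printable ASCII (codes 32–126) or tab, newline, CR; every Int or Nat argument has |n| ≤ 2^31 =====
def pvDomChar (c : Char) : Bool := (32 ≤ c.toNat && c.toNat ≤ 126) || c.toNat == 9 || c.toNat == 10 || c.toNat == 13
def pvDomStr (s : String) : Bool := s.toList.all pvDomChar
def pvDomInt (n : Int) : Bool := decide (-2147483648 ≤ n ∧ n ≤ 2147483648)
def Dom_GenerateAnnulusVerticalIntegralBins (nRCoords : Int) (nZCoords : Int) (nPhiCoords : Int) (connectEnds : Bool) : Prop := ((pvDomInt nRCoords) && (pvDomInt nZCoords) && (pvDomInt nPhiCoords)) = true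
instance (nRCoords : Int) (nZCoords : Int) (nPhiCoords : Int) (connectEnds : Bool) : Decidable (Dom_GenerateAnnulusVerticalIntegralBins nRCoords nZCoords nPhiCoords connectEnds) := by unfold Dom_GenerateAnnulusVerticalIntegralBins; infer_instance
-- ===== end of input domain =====

-- B replaces A's four nested append loops and running counter by building each bin
-- directly from a closed-form index formula (objective: simpler; same asymptotic cost).

-- ===== PORT A =====
-- A-side helpers: the three loop bodies of A's nested for-loops, ported one-to-one.
-- The innermost l-loop appends the running integratedIndex six times to
-- vBins[targetIndex]; targetIndex is nonnegative whenever an append executes,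
-- so `.toNat` on it is exact here.
def pvA_kstep (s : List (List Int) × Int × Int) : List (List Int) × Int × Int :=
  let u := (PySem.List.pyRange 0 6 1).foldl
    (fun (u : List (List Int) × Int) _l =>
      (u.1.modify s.2.2.toNat (fun b => b ++ [u.2]), u.2 + 1))
    (s.1, s.2.1)
  (u.1, u.2, s.2.2 + 1)

def pvA_jstep (phiDivisions : Int) (i : Int) (st : List (List Int) × Int) : List (List Int) × Int :=
  let r := (PySem.List.pyRange 0 phiDivisions 1).foldl
    (fun s _k => pvA_kstep s) (st.1, st.2, i * phiDivisions)
  (r.1, r.2.1)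

def pvA_istep (nZCoords : Int) (phiDivisions : Int) (st : List (List Int) × Int) (i : Int) : List (List Int) × Int :=
  (PySem.List.pyRange 0 (nZCoords - 1) 1).foldl (fun st _j => pvA_jstep phiDivisions i st) st

def GenerateAnnulusVerticalIntegralBins (nRCoords : Int) (nZCoords : Int) (nPhiCoords : Int) (connectEnds : Bool) : List (List Int) :=
  let phiDivisions := if connectEnds then nPhiCoords else nPhiCoords - 1
  let vBins : List (List Int) :=
    (PySem.List.pyRange 0 ((nRCoords - 1) * phiDivisions) 1).map (fun _ => [])
  ((PySem.List.pyRange 0 (nRCoords - 1) 1).foldl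
      (pvA_istep nZCoords phiDivisions) (vBins, 0)).1

-- ===== PORT B =====
def GenerateAnnulusVerticalIntegralBins_alt (nRCoords : Int) (nZCoords : Int) (nPhiCoords : Int) (connectEnds : Bool) : List (List Int) :=
  let phiDivisions := if connectEnds then nPhiCoords else nPhiCoords - 1
  let nz := nZCoords - 1
  (PySem.List.pyRange 0 (nRCoords - 1) 1).flatMap (fun i =>
    (PySem.List.pyRange 0 phiDivisions 1).map (fun k =>
      (PySem.List.pyRange 0 nz 1).flatMap (fun j =>
        (PySem.List.pyRange 0 6 1).map (fun l =>
          ((i * nz + j) * phiDivisions + k) * 6 + l))))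

-- ===== PRECONDITION & SPEC =====
-- On degenerate inputs with nRCoords-1 < 0 AND phiDivisions < 0, A allocates
-- (nRCoords-1)*phiDivisions > 0 bins (negative times negative) that no loop ever
-- touches and returns that spurious list of empty bins; B returns [], the intended
-- result since such a mesh has no cells and no bins.
def D_GenerateAnnulusVerticalIntegralBins (nRCoords : Int) (nZCoords : Int) (nPhiCoords : Int) (connectEnds : Bool) : Prop :=
  nRCoords - 1 < 0 ∧ (if connectEnds then nPhiCoords else nPhiCoords - 1) < 0
instance (nRCoords : Int) (nZCoords : Int) (nPhiCoords : Int) (connectEnds : Bool) : Decidable (D_GenerateAnnulusVerticalIntegralBins nRCoords nZCoords nPhiCoords connectEnds) := by unfold D_GenerateAnnulusVerticalIntegralBins; infer_instance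

def Spec_GenerateAnnulusVerticalIntegralBins (nRCoords : Int) (nZCoords : Int) (nPhiCoords : Int) (connectEnds : Bool) (out : List (List Int)) : Prop := ¬ D_GenerateAnnulusVerticalIntegralBins nRCoords nZCoords nPhiCoords connectEnds → out = GenerateAnnulusVerticalIntegralBins_alt nRCoords nZCoords nPhiCoords connectEnds
instance (nRCoords : Int) (nZCoords : Int) (nPhiCoords : Int) (connectEnds : Bool) (out : List (List Int)) : Decidable (Spec_GenerateAnnulusVerticalIntegralBins nRCoords nZCoords nPhiCoords connectEnds out) := by unfold Spec_GenerateAnnulusVerticalIntegralBins; infer_instance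

def pvDiffWitness_GenerateAnnulusVerticalIntegralBins : Int × Int × Int × Bool := (0, 0, -1, true)
def pvDiffWitnessOut_GenerateAnnulusVerticalIntegralBins : (List (List Int)) × (List (List Int)) := ([[]], [])

-- ===== CLAIM (what is proved, stated in full; the proofs are below) =====
def Claim_unchanged_GenerateAnnulusVerticalIntegralBins : Prop := ∀ (nRCoords : Int) (nZCoords : Int) (nPhiCoords : Int) (connectEnds : Bool), Dom_GenerateAnnulusVerticalIntegralBins nRCoords nZCoords nPhiCoords connectEnds → Spec_GenerateAnnulusVerticalIntegralBins nRCoords nZCoords nPhiCoords connectEnds (GenerateAnnulusVerticalIntegralBins nRCoords nZCoords nPhiCoords connectEnds)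
def Claim_changed_GenerateAnnulusVerticalIntegralBins : Prop := Dom_GenerateAnnulusVerticalIntegralBins (pvDiffWitness_GenerateAnnulusVerticalIntegralBins.1) (pvDiffWitness_GenerateAnnulusVerticalIntegralBins.2.1) (pvDiffWitness_GenerateAnnulusVerticalIntegralBins.2.2.1) (pvDiffWitness_GenerateAnnulusVerticalIntegralBins.2.2.2) ∧ D_GenerateAnnulusVerticalIntegralBins (pvDiffWitness_GenerateAnnulusVerticalIntegralBins.1) (pvDiffWitness_GenerateAnnulusVerticalIntegralBins.2.1) (pvDiffWitness_GenerateAnnulusVerticalIntegralBins.2.2.1) (pvDiffWitness_GenerateAnnulusVerticalIntegralBins.2.2.2) ∧ GenerateAnnulusVerticalIntegralBins (pvDiffWitness_GenerateAnnulusVerticalIntegralBins.1) (pvDiffWitness_GenerateAnnulusVerticalIntegralBins.2.1) (pvDiffWitness_GenerateAnnulusVerticalIntegralBins.2.2.1) (pvDiffWitness_GenerateAnnulusVerticalIntegralBins.2.2.2) = pvDiffWitnessOut_GenerateAnnulusVerticalIntegralBins.1 ∧ GenerateAnnulusVerticalIntegralBins_alt (pvDiffWitness_GenerateAnnulusVerticalIntegralBins.1)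 (pvDiffWitness_GenerateAnnulusVerticalIntegralBins.2.1) (pvDiffWitness_GenerateAnnulusVerticalIntegralBins.2.2.1) (pvDiffWitness_GenerateAnnulusVerticalIntegralBins.2.2.2) = pvDiffWitnessOut_GenerateAnnulusVerticalIntegralBins.2 ∧ pvDiffWitnessOut_GenerateAnnulusVerticalIntegralBins.1 ≠ pvDiffWitnessOut_GenerateAnnulusVerticalIntegralBins.2
def Claim_exact_GenerateAnnulusVerticalIntegralBins : Prop := ∀ (nRCoords : Int) (nZCoords : Int) (nPhiCoords : Int) (connectEnds : Bool), Dom_GenerateAnnulusVerticalIntegralBins nRCoords nZCoords nPhiCoords connectEnds → D_GenerateAnnulusVerticalIntegralBins nRCoords nZCoords nPhiCoords connectEnds → GenerateAnnulusVerticalIntegralBins nRCoords nZCoords nPhiCoords connectEnds ≠ GenerateAnnulusVerticalIntegralBins_alt nRCoords nZCoords nPhiCoords connectEnds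

-- ===== LEMMAS AND PROOFS =====

-- the six consecutive indices appended to one bin by one run of A's l-loop
def pvSeg (c : Int) : List Int := [c, c + 1, c + 2, c + 3, c + 4, c + 5]

-- one run of A's k-loop appends pvSeg (idx + 6*k) to bin t+k, for k < mid.length
def pvWithSegs : List (List Int) → Int → List (List Int)
  | [], _ => []
  | b :: rest, idx => (b ++ pvSeg idx) :: pvWithSegs rest (idx + 6)

-- rows accumulated for one bin over Q runs of the j-loop with stride 6*P
def pvBinRow : Nat → Int → Nat → List Int
  | 0, _, _ => []
  | q + 1, idx, P => pvSeg idx ++ pvBinRow q (idx + 6 * P) P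

-- the whole i-iteration effect on the P bins of block i
def pvAddRows (Q : Nat) (P : Nat) : List (List Int) → Int → List (List Int)
  | [], _ => []
  | b :: rest, idx => (b ++ pvBinRow Q idx P) :: pvAddRows Q P rest (idx + 6)

theorem pvFoldlId {α β : Type} (l : List α) (init : β) :
    l.foldl (fun s _ => s) init = init := by
  induction l generalizing init <;> simp_all [List.foldl]

theorem pvFoldlIgnore {α β : Type} (l : List α) (f : β → β) (init : β) :
    l.foldl (fun s _ => f s) init = f^[l.length] init := by
  induction l generalizing init with
  | nil => simp
  | cons x xs ih => simp [List.foldl, ih, Function.iterate_succ_apply]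

theorem pvMTIAppend {γ : Type} : ∀ (pre l : List γ) (g : List γ → List γ),
    (pre ++ l).modifyTailIdx pre.length g = pre ++ g l := by
  intro pre
  induction pre with
  | nil => intro l g; rfl
  | cons x xs ih =>
    intro l g
    show x :: (xs ++ l).modifyTailIdx xs.length g = x :: (xs ++ g l)
    rw [ih]

theorem pvModifyAppend {γ : Type} (pre l : List γ) (f : γ → γ) :
    (pre ++ l).modify pre.length f = pre ++ l.modify 0 f := by
  show (pre ++ l).modifyTailIdx pre.length (List.modifyHead f) = _
  rw [pvMTIAppend]
  rfl

theorem pvRange6 : PySem.List.pyRange 0 6 1 = [0, 1, 2, 3, 4, 5] := by decide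

theorem pvModifyModify {γ : Type} (l : List γ) : ∀ (i : Nat) (f g : γ → γ),
    (l.modify i f).modify i g = l.modify i (fun x => g (f x)) := by
  induction l with
  | nil => intro i f g; simp
  | cons x xs ih =>
    intro i f g
    cases i with
    | zero => rfl
    | succ n =>
      show x :: (xs.modify n f).modify n g = x :: xs.modify n (fun y => g (f y))
      rw [ih]

theorem pvA_kstep_eq (bins : List (List Int)) (idx : Int) (t : Int) :
    pvA_kstep (bins, idx, t)
      = (bins.modify t.toNat (fun b => b ++ pvSeg idx), idx + 6, t + 1) := by
  simp only [pvA_kstep, pvRange6, List.foldl, pvModifyModify]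
  refine Prod.ext ?_ (Prod.ext ?_ rfl)
  case refine_2 =>
    show idx + 1 + 1 + 1 + 1 + 1 + 1 = idx + 6
    omega
  show bins.modify t.toNat _ = _
  congr 1
  funext b
  simp [pvSeg, List.append_assoc]
  omega

theorem pvWithSegs_length (mid : List (List Int)) (idx : Int) :
    (pvWithSegs mid idx).length = mid.length := by
  induction mid generalizing idx <;> simp_all [pvWithSegs]

theorem pvAddRows_length (Q P : Nat) (mid : List (List Int)) (idx : Int) :
    (pvAddRows Q P mid idx).length = mid.length := by
  induction mid generalizing idx <;> simp_all [pvAddRows]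

theorem pvAddRows_zero (P : Nat) (mid : List (List Int)) : ∀ (idx : Int),
    pvAddRows 0 P mid idx = mid := by
  induction mid with
  | nil => intro idx; simp [pvAddRows]
  | cons b rest ih => intro idx; simp [pvAddRows, pvBinRow, ih]

theorem pvKloop (mid : List (List Int)) : ∀ (pre post : List (List Int)) (idx : Int),
    pvA_kstep^[mid.length] (pre ++ mid ++ post, idx, (pre.length : Int))
      = (pre ++ pvWithSegs mid idx ++ post, idx + 6 * mid.length,
         (pre.length : Int) + mid.length) := by
  induction mid with
  | nil => intro pre post idx; simp [pvWithSegs]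
  | cons b rest ih =>
    intro pre post idx
    rw [List.length_cons, Function.iterate_succ_apply, pvA_kstep_eq]
    have h1 : (pre ++ (b :: rest) ++ post).modify (Int.toNat pre.length)
        (fun x => x ++ pvSeg idx)
        = (pre ++ [b ++ pvSeg idx]) ++ rest ++ post := by
      rw [Int.toNat_natCast, List.append_assoc, pvModifyAppend]
      simp [List.modify]
    rw [h1]
    have h2 : (pre.length : Int) + 1 = ((pre ++ [b ++ pvSeg idx]).length : Int) := by
      simp
    rw [h2, ih]
    simp [pvWithSegs, List.append_assoc]
    constructor
    · omega
    · ring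

theorem pvJstep (φ i idx : Int) (mid pre post : List (List Int))
    (hmid : mid.length = φ.toNat) (hpre : (pre.length : Int) = i * φ) :
    pvA_jstep φ i (pre ++ mid ++ post, idx)
      = (pre ++ pvWithSegs mid idx ++ post, idx + 6 * φ.toNat) := by
  have hlen : (PySem.List.pyRange 0 φ 1).length = mid.length := by
    rw [PySem.List.length_pyRange_one, hmid]; norm_num
  simp only [pvA_jstep]
  rw [pvFoldlIgnore, hlen, ← hpre, pvKloop]
  simp [hmid]

theorem pvAddRows_withSegs (Q P : Nat) (mid : List (List Int)) : ∀ (idx : Int),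
    pvAddRows Q P (pvWithSegs mid idx) (idx + 6 * P) = pvAddRows (Q + 1) P mid idx := by
  induction mid with
  | nil => intro idx; simp [pvWithSegs, pvAddRows]
  | cons b rest ih =>
    intro idx
    simp only [pvWithSegs, pvAddRows, pvBinRow, List.append_assoc]
    congr 1
    rw [show idx + 6 * (P : Int) + 6 = (idx + 6) + 6 * (P : Int) by ring]
    exact ih (idx + 6)

theorem pvJloopIter (Q : Nat) (φ i : Int) (pre post : List (List Int)) :
    ∀ (mid : List (List Int)) (idx : Int), mid.length = φ.toNat →
    (pre.length : Int) = i * φ →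
    (pvA_jstep φ i)^[Q] (pre ++ mid ++ post, idx)
      = (pre ++ pvAddRows Q φ.toNat mid idx ++ post, idx + 6 * φ.toNat * Q) := by
  induction Q with
  | zero =>
    intro mid idx hmid hpre
    simp [pvAddRows_zero]
  | succ Q ih =>
    intro mid idx hmid hpre
    rw [Function.iterate_succ_apply, pvJstep φ i idx mid pre post hmid hpre,
        ih (pvWithSegs mid idx) (idx + 6 * φ.toNat)
          (by rw [pvWithSegs_length, hmid]) hpre,
        pvAddRows_withSegs]
    congr 1
    push_cast; ring

theorem pvIstep (nZ φ i : Int) (st : List (List Int) × Int) :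
    pvA_istep nZ φ st i = (pvA_jstep φ i)^[(nZ - 1).toNat] st := by
  simp only [pvA_istep]
  rw [pvFoldlIgnore, PySem.List.length_pyRange_one]
  norm_num

theorem pvPrefix_length (P Q : Nat) (N : Nat) (f : Nat → Int) :
    ((List.range N).flatMap
      (fun I => pvAddRows Q P (List.replicate P ([] : List Int)) (f I))).length
      = N * P := by
  induction N with
  | zero => simp
  | succ N ih =>
    rw [List.range_succ, List.flatMap_append]
    simp [ih, pvAddRows_length, Nat.succ_mul]

theorem pvOuterLoop (nZ φ : Int) (hφ : 0 ≤ φ) (M : Nat) :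
    ∀ (N : Nat), N ≤ M →
    (List.range N).foldl (fun st (I : Nat) => pvA_istep nZ φ st (I : Int))
        (List.replicate (M * φ.toNat) [], 0)
      = ((List.range N).flatMap
           (fun (I : Nat) => pvAddRows (nZ - 1).toNat φ.toNat
             (List.replicate φ.toNat ([] : List Int))
             (6 * (φ.toNat : Int) * ((nZ - 1).toNat : Int) * (I : Int)))
          ++ List.replicate ((M - N) * φ.toNat) [],
         6 * (φ.toNat : Int) * ((nZ - 1).toNat : Int) * (N : Int)) := by
  intro N
  induction N with
  | zero => intro _; simp
  | succ N ih =>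
    intro hNM
    have hN : N ≤ M := Nat.le_of_succ_le hNM
    rw [List.range_succ, List.foldl_append, ih hN]
    simp only [List.foldl_cons, List.foldl_nil]
    rw [pvIstep]
    have hsplit : List.replicate ((M - N) * φ.toNat) ([] : List Int)
        = List.replicate φ.toNat ([] : List Int)
          ++ List.replicate ((M - N - 1) * φ.toNat) [] := by
      rw [← List.replicate_add]
      congr 1
      have h1 : 1 ≤ M - N := by omega
      have : (M - N) * φ.toNat = (1 + (M - N - 1)) * φ.toNat := by
        congr 1; omega
      rw [this]; ring
    rw [hsplit, ← List.append_assoc]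
    rw [pvJloopIter (nZ - 1).toNat φ (N : Int) _ _
          (List.replicate φ.toNat ([] : List Int)) _
          (by simp)
          (by rw [pvPrefix_length]; push_cast [Int.toNat_of_nonneg hφ]; ring)]
    refine Prod.ext ?_ ?_
    · simp [List.flatMap_append, List.append_assoc, Nat.sub_sub]
    · show _ + _ = _
      push_cast; ring

theorem pvSegMap (c : Int) :
    (PySem.List.pyRange 0 6 1).map (fun l => c * 6 + l) = pvSeg (c * 6) := by
  rw [pvRange6]; simp [pvSeg]

theorem pvBinRow_eq (Q : Nat) (P : Nat) : ∀ (base : Int),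
    pvBinRow Q base P
      = (List.range Q).flatMap (fun (J : Nat) => pvSeg (base + 6 * P * J)) := by
  induction Q with
  | zero => intro base; simp [pvBinRow]
  | succ Q ih =>
    intro base
    rw [List.range_succ_eq_map, List.flatMap_cons, List.flatMap_map]
    simp only [pvBinRow, ih]
    congr 1
    · congr 1; norm_num
    · congr 1
      funext J
      congr 1
      push_cast; ring

theorem pvAddRows_replicate (Q P : Nat) : ∀ (n : Nat) (idx : Int),
    pvAddRows Q P (List.replicate n []) idx
      = (List.range n).map (fun (K : Nat) => pvBinRow Q (idx + 6 * K) P) := by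
  intro n
  induction n with
  | zero => intro idx; simp [pvAddRows]
  | succ n ih =>
    intro idx
    rw [List.replicate_succ, List.range_succ_eq_map, List.map_cons, List.map_map]
    simp only [pvAddRows, ih]
    congr 1
    · simp
    · congr 1
      funext K
      show pvBinRow Q (idx + 6 + 6 * (K : Int)) P
          = pvBinRow Q (idx + 6 * ((K + 1 : Nat) : Int)) P
      congr 1
      push_cast; ring

theorem pvFlatMapNil {α β : Type} (l : List α) :
    l.flatMap (fun _ => ([] : List β)) = [] := by
  induction l <;> simp_all

theorem pvMain (nR nZ φ : Int) (hm : 0 ≤ nR - 1) (hφ : 0 ≤ φ) :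
    ((PySem.List.pyRange 0 (nR - 1) 1).foldl (pvA_istep nZ φ)
        ((PySem.List.pyRange 0 ((nR - 1) * φ) 1).map (fun _ => ([] : List Int)), 0)).1
      = (PySem.List.pyRange 0 (nR - 1) 1).flatMap (fun i =>
          (PySem.List.pyRange 0 φ 1).map (fun k =>
            (PySem.List.pyRange 0 (nZ - 1) 1).flatMap (fun j =>
              (PySem.List.pyRange 0 6 1).map (fun l =>
                ((i * (nZ - 1) + j) * φ + k) * 6 + l)))) := by
  have hφP : ((φ.toNat : Nat) : Int) = φ := Int.toNat_of_nonneg hφ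
  have hmM : (((nR - 1).toNat : Nat) : Int) = nR - 1 := Int.toNat_of_nonneg hm
  have hrange : ∀ (x : Int), PySem.List.pyRange 0 x 1
      = (List.range x.toNat).map (fun (k : Nat) => (k : Int)) := by
    intro x
    rw [PySem.List.pyRange_one]
    simp
  have hbins : (PySem.List.pyRange 0 ((nR - 1) * φ) 1).map (fun _ => ([] : List Int))
      = List.replicate ((nR - 1).toNat * φ.toNat) [] := by
    rw [List.eq_replicate_iff]
    constructor
    · rw [List.length_map, PySem.List.length_pyRange_one]
      rw [show (nR - 1) * φ - 0 = (nR - 1) * φ by ring]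
      rw [← hmM, ← hφP, show ((nR - 1).toNat : Int) * (φ.toNat : Int)
            = (((nR - 1).toNat * φ.toNat : Nat) : Int) by push_cast; ring]
      exact Int.toNat_natCast _
    · intro b hb
      simp at hb
      exact hb.2
  rw [hbins, hrange (nR - 1), List.foldl_map,
      pvOuterLoop nZ φ hφ ((nR - 1).toNat) ((nR - 1).toNat) le_rfl]
  simp only [Nat.sub_self, Nat.zero_mul, List.replicate_zero, List.append_nil]
  -- B side
  rw [List.flatMap_map]
  congr 1
  funext I
  try simp only [Function.comp]
  rw [hrange φ, List.map_map, pvAddRows_replicate]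
  congr 1
  funext K
  try simp only [Function.comp]
  rw [pvBinRow_eq, hrange (nZ - 1), List.flatMap_map]
  rcases Nat.eq_zero_or_pos (nZ - 1).toNat with hQ | hQ
  · simp [hQ]
  · have hq : (((nZ - 1).toNat : Nat) : Int) = nZ - 1 := by
      refine Int.toNat_of_nonneg ?_
      by_contra h
      push_neg at h
      rw [Int.toNat_of_nonpos (le_of_lt h)] at hQ
      omega
    congr 1
    funext J
    try simp only [Function.comp]
    rw [pvSegMap]
    congr 1
    rw [hφP, hq]
    ring

theorem pvPhiNegFold (nZ φ : Int) (hφ : φ < 0) :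
    ∀ (l : List Int) (st : List (List Int) × Int),
      l.foldl (pvA_istep nZ φ) st = st := by
  have hj : ∀ (st : List (List Int) × Int) (i : Int), pvA_istep nZ φ st i = st := by
    intro st i
    have hnil : PySem.List.pyRange 0 φ 1 = [] :=
      PySem.List.pyRange_one_eq_nil (by omega)
    simp only [pvA_istep, pvA_jstep, hnil, List.foldl_nil]
    exact pvFoldlId _ st
  intro l
  induction l with
  | nil => intro st; simp
  | cons x xs ih => intro st; rw [List.foldl_cons, hj, ih]

theorem GenerateAnnulusVerticalIntegralBins_spec : Claim_unchanged_GenerateAnnulusVerticalIntegralBins := by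
  intro nR nZ nPhi ce _ hD
  unfold D_GenerateAnnulusVerticalIntegralBins at hD
  set φ := if ce then nPhi else nPhi - 1 with hφdef
  have hDφ : nR - 1 < 0 → 0 ≤ φ :=
    fun h1 => not_lt.mp (fun h2 => hD ⟨h1, h2⟩)
  show ((PySem.List.pyRange 0 (nR - 1) 1).foldl (pvA_istep nZ φ)
        ((PySem.List.pyRange 0 ((nR - 1) * φ) 1).map (fun _ => ([] : List Int)), 0)).1
      = (PySem.List.pyRange 0 (nR - 1) 1).flatMap (fun i =>
          (PySem.List.pyRange 0 φ 1).map (fun k =>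
            (PySem.List.pyRange 0 (nZ - 1) 1).flatMap (fun j =>
              (PySem.List.pyRange 0 6 1).map (fun l =>
                ((i * (nZ - 1) + j) * φ + k) * 6 + l))))
  by_cases hm : 0 ≤ nR - 1
  · by_cases hφ : 0 ≤ φ
    · exact pvMain nR nZ φ hm hφ
    · push_neg at hφ
      have hnilφ : PySem.List.pyRange 0 φ 1 = [] :=
        PySem.List.pyRange_one_eq_nil (by omega)
      have hbins : PySem.List.pyRange 0 ((nR - 1) * φ) 1 = [] :=
        PySem.List.pyRange_one_eq_nil
          (mul_nonpos_iff.mpr (Or.inl ⟨hm, le_of_lt hφ⟩))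
      rw [hbins, pvPhiNegFold nZ φ hφ]
      simp [hnilφ, pvFlatMapNil]
  · push_neg at hm
    have hφ : 0 ≤ φ := hDφ hm
    have hnil : PySem.List.pyRange 0 (nR - 1) 1 = [] :=
      PySem.List.pyRange_one_eq_nil (by omega)
    have hbins : PySem.List.pyRange 0 ((nR - 1) * φ) 1 = [] :=
      PySem.List.pyRange_one_eq_nil
        (mul_nonpos_iff.mpr (Or.inr ⟨le_of_lt hm, hφ⟩))
    rw [hnil, hbins]
    simp

theorem GenerateAnnulusVerticalIntegralBins_changed : Claim_changed_GenerateAnnulusVerticalIntegralBins := by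
  unfold Claim_changed_GenerateAnnulusVerticalIntegralBins; decide

theorem GenerateAnnulusVerticalIntegralBins_tight : Claim_exact_GenerateAnnulusVerticalIntegralBins := by
  intro nR nZ nPhi ce _ hD
  unfold D_GenerateAnnulusVerticalIntegralBins at hD
  obtain ⟨hm, hφ⟩ := hD
  set φ := if ce then nPhi else nPhi - 1 with hφdef
  show ((PySem.List.pyRange 0 (nR - 1) 1).foldl (pvA_istep nZ φ)
        ((PySem.List.pyRange 0 ((nR - 1) * φ) 1).map (fun _ => ([] : List Int)), 0)).1
      ≠ (PySem.List.pyRange 0 (nR - 1) 1).flatMap (fun i =>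
          (PySem.List.pyRange 0 φ 1).map (fun k =>
            (PySem.List.pyRange 0 (nZ - 1) 1).flatMap (fun j =>
              (PySem.List.pyRange 0 6 1).map (fun l =>
                ((i * (nZ - 1) + j) * φ + k) * 6 + l))))
  have hnil : PySem.List.pyRange 0 (nR - 1) 1 = [] :=
    PySem.List.pyRange_one_eq_nil (by omega)
  rw [hnil]
  simp only [List.foldl_nil, List.flatMap_nil]
  intro heq
  have hlen := congrArg List.length heq
  rw [List.length_map, PySem.List.length_pyRange_one, List.length_nil] at hlen
  have hpos : 0 < (nR - 1) * φ := mul_pos_of_neg_of_neg hm hφ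
  set x := (nR - 1) * φ with hx
  rw [show x - 0 = x by ring] at hlen
  omega
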